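-- pv_equiv track=rewrite | github.com/kasigmon/NLP-Based-Patent-Specification-And-Claim-Analysis | core/uspto_file_retrieval.py | get_pdf_download_url
-- ===== SOURCE A (Python) =====
-- def get_pdf_download_url(doc):
--     bag = doc.get("downloadOptionBag") or []
--     for opt in bag:
--         if str(opt.get("mimeTypeIdentifier", "")).upper() == "PDF" and opt.get("downloadUrl"):
--             return opt["downloadUrl"]
--     for opt in bag:
--         if opt.get("downloadUrl"):
--             return opt["downloadUrl"]
--     raise RuntimeError("No downloadUrl found for this document.")
-- ===== SOURCE B (Python) =====
-- def get_pdf_download_url(doc):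
--     bag = doc.get("downloadOptionBag") or []
--     pdf_url = None
--     any_url = None
--     for opt in bag:
--         url = opt.get("downloadUrl")
--         if not url:
--             continue
--         if any_url is None:
--             any_url = url
--         if pdf_url is None and str(opt.get("mimeTypeIdentifier", "")).upper() == "PDF":
--             pdf_url = url
--     if pdf_url is not None:
--         return pdf_url
--     if any_url is not None:
--         return any_url
--     raise RuntimeError("No downloadUrl found for this document.")
-- ===== Notes on version B (the rewrite author's own statement) =====
-- stated objective: simpler
-- what changed: Replaces A's two sequential scans of the option bag with a single pass that records the first PDF url and the first url of any kind, choosing between them afterwards.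
import Mathlib
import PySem

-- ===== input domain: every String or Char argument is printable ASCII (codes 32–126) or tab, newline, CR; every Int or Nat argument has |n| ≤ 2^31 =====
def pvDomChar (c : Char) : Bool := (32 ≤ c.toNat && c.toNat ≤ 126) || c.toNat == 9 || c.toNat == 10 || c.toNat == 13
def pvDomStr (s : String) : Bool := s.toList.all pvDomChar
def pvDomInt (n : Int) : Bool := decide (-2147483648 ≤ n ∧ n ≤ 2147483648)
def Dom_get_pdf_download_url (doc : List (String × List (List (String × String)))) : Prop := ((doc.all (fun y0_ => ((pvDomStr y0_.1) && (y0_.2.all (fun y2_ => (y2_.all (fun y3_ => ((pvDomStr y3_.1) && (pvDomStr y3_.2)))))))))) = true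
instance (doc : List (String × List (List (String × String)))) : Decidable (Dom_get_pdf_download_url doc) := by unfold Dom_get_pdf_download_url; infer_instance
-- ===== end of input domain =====

-- B replaces A's two sequential scans of the option bag by a single pass keeping the first
-- PDF url and the first url of any kind (simpler decomposition; same O(n) cost).


-- ===== PORT A =====
-- d.get(k, dflt) on an association list: first match, else the default.
def pvGetD {α : Type} (d : List (String × α)) (k : String) (dflt : α) : α :=
  match d.find? (fun p => p.1 == k) with
  | some p => p.2
  | none => dflt

-- A's first loop: first option whose mime type upper-cases to "PDF" and has a truthy downloadUrl.
-- (opt.get("downloadUrl") is falsy exactly when it is missing or "", so pvGetD … "" ≠ "" is truthiness.)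
def pvFindPdfA : List (List (String × String)) → Option String
  | [] => none
  | opt :: rest =>
    if PySem.Str.upper (pvGetD opt "mimeTypeIdentifier" "") = "PDF" ∧ pvGetD opt "downloadUrl" "" ≠ "" then
      some (pvGetD opt "downloadUrl" "")
    else pvFindPdfA rest

-- A's second loop: first option with a truthy downloadUrl.
def pvFindAnyA : List (List (String × String)) → Option String
  | [] => none
  | opt :: rest =>
    if pvGetD opt "downloadUrl" "" ≠ "" then some (pvGetD opt "downloadUrl" "")
    else pvFindAnyA rest

def get_pdf_download_url (doc : List (String × List (List (String × String)))) : String :=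
  -- bag = doc.get("downloadOptionBag") or []  (a missing key and an empty list both yield [])
  match pvFindPdfA (pvGetD doc "downloadOptionBag" []) with
  | some u => u
  | none =>
    match pvFindAnyA (pvGetD doc "downloadOptionBag" []) with
    | some u => u
    | none => ""   -- the RuntimeError branch; excluded by Pre_

-- ===== PORT B =====
-- B's single pass: carry (first PDF url found so far, first url of any kind found so far).
def pvScanB : List (List (String × String)) → Option String → Option String → Option String × Option String
  | [], pdf, any => (pdf, any)
  | opt :: rest, pdf, any =>
    let url := pvGetD opt "downloadUrl" ""
    if url = "" then pvScanB rest pdf any   -- `if not url: continue`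
    else
      let any' := if any.isNone then some url else any
      let pdf' := if pdf.isNone ∧ PySem.Str.upper (pvGetD opt "mimeTypeIdentifier" "") = "PDF"
                  then some url else pdf
      pvScanB rest pdf' any'

def get_pdf_download_url_alt (doc : List (String × List (List (String × String)))) : String :=
  match pvScanB (pvGetD doc "downloadOptionBag" []) none none with
  | (some u, _) => u
  | (none, some u) => u
  | (none, none) => ""   -- the RuntimeError branch; excluded by Pre_

-- ===== PRECONDITION & SPEC =====
-- Pre_ excludes exactly the inputs where A raises RuntimeError: no option in the bag has a truthy downloadUrl.
def Pre_get_pdf_download_url (doc : List (String × List (List (String × String)))) : Prop :=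
  ∃ opt ∈ pvGetD doc "downloadOptionBag" ([] : List (List (String × String))), pvGetD opt "downloadUrl" "" ≠ ""
instance (doc : List (String × List (List (String × String)))) : Decidable (Pre_get_pdf_download_url doc) := by unfold Pre_get_pdf_download_url; infer_instance

def pvWitness_get_pdf_download_url : (List (String × List (List (String × String)))) :=
  [("downloadOptionBag", [[("mimeTypeIdentifier", "PDF"), ("downloadUrl", "http://x/doc.pdf")]])]

def Spec_get_pdf_download_url (doc : List (String × List (List (String × String)))) (out : String) : Prop := out = get_pdf_download_url_alt doc
instance (doc : List (String × List (List (String × String)))) (out : String) : Decidable (Spec_get_pdf_download_url doc out) := by unfold Spec_get_pdf_download_url; infer_instance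

-- ===== CLAIM (what is proved, stated in full; the proofs are below) =====
def Claim_equal_get_pdf_download_url : Prop := ∀ (doc : List (String × List (List (String × String)))), Dom_get_pdf_download_url doc → Pre_get_pdf_download_url doc → Spec_get_pdf_download_url doc (get_pdf_download_url doc)

-- ===== LEMMAS AND PROOFS =====

-- The one-pass scan computes "state, else the corresponding scan of the rest".
theorem pvScanB_eq (bag : List (List (String × String))) :
    ∀ pdf any : Option String,
      pvScanB bag pdf any = (pdf.orElse (fun _ => pvFindPdfA bag), any.orElse (fun _ => pvFindAnyA bag)) := by
  induction bag with
  | nil => intro pdf any; cases pdf <;> cases any <;> simp [pvScanB, pvFindPdfA, pvFindAnyA, Option.orElse]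
  | cons opt rest ih =>
    intro pdf any
    simp only [pvScanB, pvFindPdfA, pvFindAnyA]
    by_cases hurl : pvGetD opt "downloadUrl" "" = ""
    · simp only [hurl]
      rw [ih]
      simp
    · simp only [if_neg hurl]
      rw [ih]
      by_cases hmime : PySem.Str.upper (pvGetD opt "mimeTypeIdentifier" "") = "PDF"
      · cases pdf <;> cases any <;> simp [hmime, hurl, Option.orElse]
      · cases pdf <;> cases any <;> simp [hmime, hurl, Option.orElse]

-- Under Pre_, the fallback scan finds a url.
theorem pvFindAnyA_isSome (bag : List (List (String × String)))
    (h : ∃ opt ∈ bag, pvGetD opt "downloadUrl" "" ≠ "") : (pvFindAnyA bag).isSome := by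
  induction bag with
  | nil => simp at h
  | cons opt rest ih =>
    simp only [pvFindAnyA]
    by_cases hurl : pvGetD opt "downloadUrl" "" = ""
    · simp only [if_neg (not_not_intro hurl)]
      apply ih
      rcases h with ⟨o, ho, hne⟩
      rcases List.mem_cons.mp ho with rfl | hmem
      · exact absurd hurl hne
      · exact ⟨o, hmem, hne⟩
    · simp [hurl]

-- ===== VERDICT (by name: the statement is the Claim_ definition above) =====
theorem get_pdf_download_url_spec : Claim_equal_get_pdf_download_url := by
  intro doc _ hpre
  unfold Spec_get_pdf_download_url get_pdf_download_url get_pdf_download_url_alt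
  rw [pvScanB_eq]
  simp only [Option.orElse]
  cases hp : pvFindPdfA (pvGetD doc "downloadOptionBag" []) with
  | some u => simp
  | none =>
    cases ha : pvFindAnyA (pvGetD doc "downloadOptionBag" []) with
    | some u => simp
    | none =>
      exact absurd (pvFindAnyA_isSome _ hpre) (by simp [ha])
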